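-- pv_equiv track=rewrite | github.com/krmax44/froide-campaign | froide_campaign/providers/base.py | _get_foirequest_info
-- ===== SOURCE A (Python) =====
-- def _get_foirequest_info(frs):
--     id, res = frs[0].get('id'), 'pending'
--
--     refused = None
--
--     for fr in frs:
--         if fr.get('resolution'):
--             if fr.get('resolution') == 'successful':
--                 return fr.get('id'), fr.get('resolution')
--             if fr.get('resolution') == 'refused':
--                 refused = (fr.get('id'), fr.get('resolution'))
--     if refused:
--         return refused[0], refused[1]
--     return id, res
-- ===== SOURCE B (Python) =====
-- def _get_foirequest_info(frs):
--     # pass 1: first successful wins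
--     for fr in frs:
--         if fr.get('resolution') == 'successful':
--             return fr.get('id'), 'successful'
--     # pass 2: last refused otherwise
--     refused = [fr for fr in frs if fr.get('resolution') == 'refused']
--     if refused:
--         return refused[-1].get('id'), 'refused'
--     return frs[0].get('id'), 'pending'
-- ===== Notes on version B (the rewrite author's own statement) =====
-- stated objective: simpler
-- what changed: Replaces A's single early-exit loop carrying a mutable 'refused' slot with two separately-shaped passes: a find-first scan for 'successful', then a filter taking the last 'refused' element, else the pending fallback.
import Mathlib
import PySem

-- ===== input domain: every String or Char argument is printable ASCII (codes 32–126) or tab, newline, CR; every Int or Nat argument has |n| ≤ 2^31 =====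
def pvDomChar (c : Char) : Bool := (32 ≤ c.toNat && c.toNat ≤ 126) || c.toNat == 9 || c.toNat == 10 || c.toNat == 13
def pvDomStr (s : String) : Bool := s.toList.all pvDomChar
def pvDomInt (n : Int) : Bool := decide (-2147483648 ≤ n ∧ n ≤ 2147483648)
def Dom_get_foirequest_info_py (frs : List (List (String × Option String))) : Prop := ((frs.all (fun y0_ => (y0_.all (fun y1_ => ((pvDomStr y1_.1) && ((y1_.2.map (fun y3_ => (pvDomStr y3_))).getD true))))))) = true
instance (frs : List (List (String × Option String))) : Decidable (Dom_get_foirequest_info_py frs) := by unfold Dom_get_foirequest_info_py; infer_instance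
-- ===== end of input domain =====

-- B replaces A's single early-exit loop with a mutable 'refused' slot by two separately
-- shaped passes (find first 'successful'; else filter and take the last 'refused');
-- objective: simpler. Equivalence is about the return value; neither mutates its input.

-- fr.get(k) on a dict whose values may be None: missing key and stored None both give none
def pyget (fr : List (String × Option String)) (k : String) : Option String :=
  PySem.Dict.getD (PySem.Dict.ofList fr) k none

-- ===== PORT A =====
-- Python truthiness of an Optional[str]: None and '' are falsy
def pyTruthyOptStr : Option String → Bool
  | none => false
  | some s => !(s == "")

-- the for-loop of A: either early-returns (.inl) or ends with the final 'refused' slot (.inr).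
-- (A stores fr.get('resolution') in the tuple; at those points it is known equal to the
--  string literal just compared against, which the port writes as that String literal.)
def aLoop (frs : List (List (String × Option String)))
    (refused : Option (Option String × String)) :
    (Option String × String) ⊕ Option (Option String × String) :=
  match frs with
  | [] => .inr refused
  | fr :: rest =>
    if pyTruthyOptStr (pyget fr "resolution") then
      if pyget fr "resolution" == some "successful" then
        .inl (pyget fr "id", "successful")
      else if pyget fr "resolution" == some "refused" then
        aLoop rest (some (pyget fr "id", "refused"))
      else aLoop rest refused
    else aLoop rest refused

def get_foirequest_info_py (frs : List (List (String × Option String))) : Option String × String :=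
  match frs with
  | [] => (none, "pending")  -- Python raises IndexError here; excluded by Pre_
  | fr0 :: _ =>
    let id := pyget fr0 "id"
    match aLoop frs none with
    | .inl out => out
    | .inr (some r) => (r.1, r.2)
    | .inr none => (id, "pending")

-- ===== PORT B =====
-- pass 1: first successful
def bFindSucc : List (List (String × Option String)) → Option (Option String)
  | [] => none
  | fr :: rest =>
    if pyget fr "resolution" == some "successful" then some (pyget fr "id")
    else bFindSucc rest

def get_foirequest_info_py_alt (frs : List (List (String × Option String))) : Option String × String :=
  match bFindSucc frs with
  | some i => (i, "successful")
  | none =>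
    -- pass 2: last refused
    let refused := frs.filter (fun fr => pyget fr "resolution" == some "refused")
    match refused.getLast? with
    | some fr => (pyget fr "id", "refused")
    | none =>
      match frs with
      | [] => (none, "pending")  -- Python raises IndexError here; excluded by Pre_
      | fr0 :: _ => (pyget fr0 "id", "pending")

-- ===== PRECONDITION & SPEC =====
-- Pre_ excludes only the empty list, on which Python A raises IndexError (frs[0]).
def Pre_get_foirequest_info_py (frs : List (List (String × Option String))) : Prop := frs ≠ []
instance (frs : List (List (String × Option String))) : Decidable (Pre_get_foirequest_info_py frs) := by unfold Pre_get_foirequest_info_py; infer_instance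
def pvWitness_get_foirequest_info_py : (List (List (String × Option String))) :=
  [[("id", some "1"), ("resolution", some "refused")], [("id", some "2"), ("resolution", none)]]

def Spec_get_foirequest_info_py (frs : List (List (String × Option String))) (out : Option String × String) : Prop := out = get_foirequest_info_py_alt frs
instance (frs : List (List (String × Option String))) (out : Option String × String) : Decidable (Spec_get_foirequest_info_py frs out) := by unfold Spec_get_foirequest_info_py; infer_instance

-- ===== CLAIM (what is proved, stated in full; the proofs are below) =====
def Claim_equal_get_foirequest_info_py : Prop := ∀ (frs : List (List (String × Option String))), Dom_get_foirequest_info_py frs → Pre_get_foirequest_info_py frs → Spec_get_foirequest_info_py frs (get_foirequest_info_py frs)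

-- ===== LEMMAS AND PROOFS =====

-- the loop of A, with an arbitrary incoming refused slot, in terms of B's two passes
theorem aLoop_eq (frs : List (List (String × Option String)))
    (refused : Option (Option String × String)) :
    aLoop frs refused =
      match bFindSucc frs with
      | some i => .inl (i, "successful")
      | none =>
        match (frs.filter (fun fr => pyget fr "resolution" == some "refused")).getLast? with
        | some fr => .inr (some (pyget fr "id", "refused"))
        | none => .inr refused := by
  induction frs generalizing refused with
  | nil => simp [aLoop, bFindSucc]
  | cons fr rest ih =>
    simp only [aLoop, bFindSucc, List.filter_cons]
    by_cases hs : pyget fr "resolution" == some "successful"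
    · have ht : pyTruthyOptStr (pyget fr "resolution") = true := by
        have := eq_of_beq hs
        simp [this, pyTruthyOptStr]
      simp [ht, hs]
    · by_cases hr : pyget fr "resolution" == some "refused"
      · have ht : pyTruthyOptStr (pyget fr "resolution") = true := by
          have := eq_of_beq hr
          simp [this, pyTruthyOptStr]
        simp only [ht, if_true, hs, if_false, hr, ih]
        cases hfs : bFindSucc rest with
        | some i => simp
        | none =>
          simp only []
          cases hl : (rest.filter (fun fr => pyget fr "resolution" == some "refused")).getLast? with
          | some fr' => simp [List.getLast?_cons, hl]
          | none =>
            have : rest.filter (fun fr => pyget fr "resolution" == some "refused") = [] :=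
              List.getLast?_eq_none_iff.mp hl
            simp [this]
      · by_cases ht : pyTruthyOptStr (pyget fr "resolution")
        · simp [ht, hs, hr, ih]
        · simp [ht, hs, hr, ih]

theorem get_foirequest_info_py_spec : Claim_equal_get_foirequest_info_py := by
  intro frs _hdom hpre
  unfold Spec_get_foirequest_info_py
  match frs with
  | [] => exact absurd rfl hpre
  | fr0 :: rest =>
    simp only [get_foirequest_info_py, get_foirequest_info_py_alt, aLoop_eq]
    cases hfs : bFindSucc (fr0 :: rest) with
    | some i => simp
    | none =>
      cases hl : ((fr0 :: rest).filter (fun fr => pyget fr "resolution" == some "refused")).getLast? with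
      | some fr' => simp
      | none => simp
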